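-- pv_equiv track=rewrite | github.com/kamsahn/sam-learns | daily-coding-problem/209.py | get_longest_substring
-- ===== SOURCE A (Python) =====
-- def get_longest_substring(l1, l2, l3):
--     longest = ""
--     last_i_2 = -1
--     last_i_3 = -1
--     for i in range(len(l1)):
--         letter = l1[i]
--         temp = longest + letter
--
--         letter_i_in_l2 = [j for j in range(len(l2)) if l2[j] == letter and j > last_i_2]
--         letter_i_in_l3 = [j for j in range(len(l3)) if l3[j] == letter and j > last_i_3]
--
--         if len(letter_i_in_l2) and len(letter_i_in_l3):
--             last_i_2 = letter_i_in_l2[0]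
--             last_i_3 = letter_i_in_l3[0]
--             longest = temp
--
--     return longest
-- ===== SOURCE B (Python) =====
-- def _automaton(s):
--     # nxt[i] maps each character c to the smallest index j >= i with s[j] == c;
--     # built right to left, each level extending the level after it.
--     nxt = [None] * (len(s) + 1)
--     nxt[len(s)] = {}
--     for i in range(len(s) - 1, -1, -1):
--         cur = dict(nxt[i + 1])
--         cur[s[i]] = i
--         nxt[i] = cur
--     return nxt
--
--
-- def get_longest_substring(l1, l2, l3):
--     nxt2 = _automaton(l2)
--     nxt3 = _automaton(l3)
--     i2 = i3 = 0
--     out = []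
--     for c in l1:
--         j2 = nxt2[i2].get(c)
--         j3 = nxt3[i3].get(c)
--         if j2 is not None and j3 is not None:
--             out.append(c)
--             i2 = j2 + 1
--             i3 = j3 + 1
--     return "".join(out)
-- ===== Notes on version B (the rewrite author's own statement) =====
-- stated objective: faster
-- what changed: B builds a subsequence automaton for l2 and l3 (for every position, a map from character to its next occurrence at or after that position, constructed right-to-left), then matches l1 with two automaton pointers in O(1) per character, instead of A's per-character full index-comprehension rescans of l2 and l3.
import Mathlib
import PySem

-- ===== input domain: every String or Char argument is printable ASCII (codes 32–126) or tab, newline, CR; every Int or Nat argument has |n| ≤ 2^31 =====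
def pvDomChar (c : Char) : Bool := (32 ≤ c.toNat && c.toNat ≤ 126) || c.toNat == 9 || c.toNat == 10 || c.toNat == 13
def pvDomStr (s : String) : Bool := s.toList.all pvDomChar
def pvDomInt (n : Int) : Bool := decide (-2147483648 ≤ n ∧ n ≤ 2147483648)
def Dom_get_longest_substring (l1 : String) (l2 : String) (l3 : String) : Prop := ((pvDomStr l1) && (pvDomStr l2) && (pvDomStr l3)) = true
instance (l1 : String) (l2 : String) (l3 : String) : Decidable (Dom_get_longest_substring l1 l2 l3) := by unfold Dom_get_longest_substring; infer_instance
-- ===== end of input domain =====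

-- B replaces A's per-character full rescans of l2/l3 by a subsequence automaton
-- (per position, a map to the next occurrence of each character) built once,
-- right to left (objective: faster).

-- ===== PORT A =====
-- loop body of A: one step of the for-loop, on the current letter l1[i]
def pvStepA (cs2 cs3 : List Char) (st : List Char × Int × Int) (letter : Char) :
    List Char × Int × Int :=
  let temp := st.1 ++ [letter]
  let c2 := (PySem.List.pyRange 0 (cs2.length : Int) 1).filter
    (fun j => PySem.List.pyGetD cs2 j ' ' == letter && decide (st.2.1 < j))
  let c3 := (PySem.List.pyRange 0 (cs3.length : Int) 1).filter
    (fun j => PySem.List.pyGetD cs3 j ' ' == letter && decide (st.2.2 < j))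
  if c2.length ≠ 0 ∧ c3.length ≠ 0 then
    (temp, PySem.List.pyGetD c2 0 0, PySem.List.pyGetD c3 0 0)
  else st

def get_longest_substring (l1 : String) (l2 : String) (l3 : String) : String :=
  (PySem.List.pyRange 0 (l1.toList.length : Int) 1).foldl
    (fun st i => pvStepA l2.toList l3.toList st (PySem.List.pyGetD l1.toList i ' '))
    (([], -1, -1) : List Char × Int × Int)
    |>.1 |> String.ofList

-- ===== PORT B =====
-- _automaton(s): level i maps each character to its first position ≥ i; Python's
-- backward loop (each level = the next level with s[i] set to i) becomes the
-- obvious structural recursion on the suffix, i the absolute position.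
def pvAut : List Char → Nat → List (PySem.Dict Char Nat)
  | [], _ => [PySem.Dict.empty]
  | y :: t, i =>
      let rest := pvAut t (i + 1)
      (rest.headD PySem.Dict.empty).insert y i :: rest

-- loop body of B: look the letter up in the automaton level at each pointer
def pvStepB (nxt2 nxt3 : List (PySem.Dict Char Nat)) (st : List Char × Nat × Nat)
    (c : Char) : List Char × Nat × Nat :=
  match (nxt2.getD st.2.1 PySem.Dict.empty).get? c,
        (nxt3.getD st.2.2 PySem.Dict.empty).get? c with
  | some j2, some j3 => (st.1 ++ [c], j2 + 1, j3 + 1)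
  | _, _ => st

def get_longest_substring_alt (l1 : String) (l2 : String) (l3 : String) : String :=
  (l1.toList.foldl (pvStepB (pvAut l2.toList 0) (pvAut l3.toList 0)) ([], 0, 0)).1
    |> String.ofList

-- ===== PRECONDITION & SPEC =====
def Spec_get_longest_substring (l1 : String) (l2 : String) (l3 : String) (out : String) : Prop := out = get_longest_substring_alt l1 l2 l3
instance (l1 : String) (l2 : String) (l3 : String) (out : String) : Decidable (Spec_get_longest_substring l1 l2 l3 out) := by unfold Spec_get_longest_substring; infer_instance

-- ===== CLAIM (what is proved, stated in full; the proofs are below) =====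
def Claim_equal_get_longest_substring : Prop := ∀ (l1 : String) (l2 : String) (l3 : String), Dom_get_longest_substring l1 l2 l3 → Spec_get_longest_substring l1 l2 l3 (get_longest_substring l1 l2 l3)

-- ===== LEMMAS AND PROOFS =====

-- the head automaton level of a suffix starting at absolute position i
theorem pvAut_head_get (t : List Char) (i : Nat) (c : Char) :
    ((pvAut t i).headD PySem.Dict.empty).get? c
      = (List.findIdx? (· == c) t).map (i + ·) := by
  induction t generalizing i with
  | nil => simp [pvAut, PySem.Dict.get?_empty]
  | cons y t ih =>
    simp only [pvAut, List.headD_cons, PySem.Dict.get?_insert, List.findIdx?_cons]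
    by_cases hc : c = y
    · simp [hc]
    · have hy : (y == c) = false := by
        simp only [beq_eq_false_iff_ne, ne_eq]
        exact fun h => hc h.symm
      rw [if_neg hc, ih, hy]
      simp only [Bool.false_eq_true, if_false]
      cases List.findIdx? (· == c) t <;> simp <;> try omega

-- indexing the automaton list at k lands on the level of the suffix from k
theorem pvAut_getD (t : List Char) (k i : Nat) (hk : k ≤ t.length) :
    (pvAut t i).getD k PySem.Dict.empty
      = (pvAut (t.drop k) (i + k)).headD PySem.Dict.empty := by
  induction t generalizing k i with
  | nil =>
    have : k = 0 := Nat.le_zero.mp (by simpa using hk)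
    subst this
    simp [pvAut]
  | cons y t ih =>
    cases k with
    | zero => simp [pvAut]
    | succ k =>
      have hk' : k ≤ t.length := by simpa using hk
      simp only [pvAut, List.getD_cons_succ, List.drop_succ_cons]
      rw [ih k (i + 1) hk']
      have h : i + 1 + k = i + (k + 1) := by omega
      rw [h]

-- B's lookup at pointer k: first occurrence of c at or after k in cs
theorem pvAut_lookup (cs : List Char) (k : Nat) (c : Char) (hk : k ≤ cs.length) :
    ((pvAut cs 0).getD k PySem.Dict.empty).get? c
      = (List.findIdx? (· == c) (cs.drop k)).map (k + ·) := by
  rw [pvAut_getD cs k 0 hk, pvAut_head_get]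
  simp

-- A's comprehension with the ' index > k-1 ' constraint, as a find? over range'
-- with an offset (the shape the induction over the scanned string needs)
theorem pvFindRange (cs : List Char) (b k : Nat) (c : Char) :
    List.find? (fun j => (cs.getD (j - b) ' ' == c) && decide (b + k ≤ j))
        (List.range' b cs.length)
      = (List.findIdx? (· == c) (cs.drop k)).map (fun d => b + k + d) := by
  induction cs generalizing b k with
  | nil => simp
  | cons y t ih =>
    rw [List.length_cons, List.range'_succ]
    have tl : ∀ (k' : Nat), (∀ j, b + 1 ≤ j → (b + k ≤ j ↔ b + 1 + k' ≤ j)) →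
        List.find? (fun j => ((y :: t).getD (j - b) ' ' == c) && decide (b + k ≤ j))
          (List.range' (b + 1) t.length)
        = (List.findIdx? (· == c) (t.drop k')).map (fun d => b + 1 + k' + d) := by
      intro k' hk'
      have hcong : ∀ j ∈ List.range' (b + 1) t.length,
          (((y :: t).getD (j - b) ' ' == c) && decide (b + k ≤ j))
            = ((t.getD (j - (b + 1)) ' ' == c) && decide (b + 1 + k' ≤ j)) := by
        intro j hj
        have hbj : b + 1 ≤ j := List.left_le_of_mem_range' hj
        have h1 : j - b = (j - (b + 1)) + 1 := by omega
        rw [h1, List.getD_cons_succ]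
        congr 1
        exact decide_eq_decide.mpr (hk' j hbj)
      rw [← List.head?_filter, List.filter_congr hcong, List.head?_filter, ih (b + 1) k']
    cases k with
    | zero =>
      by_cases hy : (y == c) = true
      · rw [List.find?_cons_of_pos (by simp [hy])]
        simp [List.findIdx?_cons, hy]
      · have hyf : (y == c) = false := by simpa using hy
        rw [List.find?_cons_of_neg (by simp [hyf])]
        rw [tl 0 (by intro j hj; omega)]
        simp only [List.drop_zero, List.findIdx?_cons, hyf, Bool.false_eq_true, if_false]
        cases List.findIdx? (· == c) t <;> simp <;> try omega
    | succ k0 =>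
      rw [List.find?_cons_of_neg (by simp)]
      rw [tl k0 (by intro j hj; omega)]
      simp only [List.drop_succ_cons]
      cases List.findIdx? (· == c) (t.drop k0) <;> simp <;> try omega

-- head of A's filtered index list, in terms of findIdx? on the suffix
theorem pvHeadA (cs : List Char) (k : Nat) (c : Char) :
    ((PySem.List.pyRange 0 (cs.length : Int) 1).filter
        (fun j => PySem.List.pyGetD cs j ' ' == c && decide ((k : Int) - 1 < j))).head?
      = (List.findIdx? (· == c) (cs.drop k)).map (fun d => ((k + d : Nat) : Int)) := by
  rw [PySem.List.pyRange_zero_natCast, List.filter_map, List.head?_map, List.head?_filter]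
  have hfind : List.find?
        ((fun j => PySem.List.pyGetD cs j ' ' == c && decide ((k : Int) - 1 < j))
          ∘ (fun n : Nat => (n : Int)))
        (List.range cs.length)
      = List.find? (fun j => (cs.getD (j - 0) ' ' == c) && decide (0 + k ≤ j))
        (List.range cs.length) := by
    have hcong : ∀ j ∈ List.range cs.length,
        ((fun j => PySem.List.pyGetD cs j ' ' == c && decide ((k : Int) - 1 < j))
          ∘ (fun n : Nat => (n : Int))) j
          = ((cs.getD (j - 0) ' ' == c) && decide (0 + k ≤ j)) := by
      intro j hj
      simp only [Function.comp_apply, PySem.List.pyGetD_natCast, Nat.sub_zero, Nat.zero_add]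
      congr 1
      exact decide_eq_decide.mpr (by omega)
    rw [← List.head?_filter, List.filter_congr hcong, List.head?_filter]
  rw [hfind, List.range_eq_range', pvFindRange cs 0 k c]
  cases List.findIdx? (· == c) (cs.drop k) <;> simp

-- findIdx? returns an index into the list
theorem pv_findIdx_lt (p : Char → Bool) (l : List Char) (i : Nat)
    (h : List.findIdx? p l = some i) : i < l.length := by
  induction l generalizing i with
  | nil => simp at h
  | cons a t ih =>
    rw [List.findIdx?_cons] at h
    by_cases hp : p a = true
    · rw [if_pos hp] at h
      cases h
      simp
    · rw [if_neg hp] at h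
      cases hm : List.findIdx? p t with
      | none => rw [hm] at h; simp at h
      | some j =>
        rw [hm] at h
        simp only [Option.map_some] at h
        cases h
        have := ih j hm
        simp only [List.length_cons]
        omega

-- one loop step: A's state (letters, k2-1, k3-1) corresponds to B's (letters, k2, k3),
-- and the correspondence (with the pointer bounds) is preserved
theorem pvStep_eq (cs2 cs3 acc : List Char) (k2 k3 : Nat) (c : Char)
    (h2 : k2 ≤ cs2.length) (h3 : k3 ≤ cs3.length) :
    ∃ acc' k2' k3', k2' ≤ cs2.length ∧ k3' ≤ cs3.length ∧
      pvStepA cs2 cs3 (acc, (k2 : Int) - 1, (k3 : Int) - 1) c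
        = (acc', (k2' : Int) - 1, (k3' : Int) - 1) ∧
      pvStepB (pvAut cs2 0) (pvAut cs3 0) (acc, k2, k3) c = (acc', k2', k3') := by
  have hA2 := pvHeadA cs2 k2 c
  have hA3 := pvHeadA cs3 k3 c
  have hB2 := pvAut_lookup cs2 k2 c h2
  have hB3 := pvAut_lookup cs3 k3 c h3
  simp only [pvStepA, pvStepB]
  cases m2 : List.findIdx? (· == c) (cs2.drop k2) with
  | none =>
    rw [m2] at hA2 hB2
    simp only [Option.map_none] at hA2 hB2
    rw [List.head?_eq_none_iff] at hA2
    refine ⟨acc, k2, k3, h2, h3, ?_, ?_⟩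
    · rw [hA2]
      simp
    · rw [hB2]
  | some d2 =>
    rw [m2] at hA2 hB2
    simp only [Option.map_some] at hA2 hB2
    obtain ⟨t2, ht2⟩ := List.head?_eq_some_iff.mp hA2
    have hd2 : d2 < cs2.length - k2 := by
      have := pv_findIdx_lt _ _ _ m2
      simpa using this
    cases m3 : List.findIdx? (· == c) (cs3.drop k3) with
    | none =>
      rw [m3] at hA3 hB3
      simp only [Option.map_none] at hA3 hB3
      rw [List.head?_eq_none_iff] at hA3
      refine ⟨acc, k2, k3, h2, h3, ?_, ?_⟩
      · rw [hA3]
        simp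
      · rw [hB2, hB3]
    | some d3 =>
      rw [m3] at hA3 hB3
      simp only [Option.map_some] at hA3 hB3
      obtain ⟨t3, ht3⟩ := List.head?_eq_some_iff.mp hA3
      have hd3 : d3 < cs3.length - k3 := by
        have := pv_findIdx_lt _ _ _ m3
        simpa using this
      refine ⟨acc ++ [c], k2 + d2 + 1, k3 + d3 + 1, by omega, by omega, ?_, ?_⟩
      · rw [ht2, ht3, if_pos ⟨by simp, by simp⟩]
        simp only [Prod.mk.injEq]
        refine ⟨trivial, ?_, ?_⟩ <;>
          · simp [PySem.List.pyGetD, PySem.List.pyGet?, PySem.List.pyIdx?]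
            try push_cast
            try omega
      · rw [hB2, hB3]
  
-- the main loop invariant, by induction on the rest of l1
theorem pvMain (cs2 cs3 : List Char) (t : List Char) :
    ∀ (acc : List Char) (k2 k3 : Nat), k2 ≤ cs2.length → k3 ≤ cs3.length →
    (t.foldl (pvStepA cs2 cs3) (acc, (k2 : Int) - 1, (k3 : Int) - 1)).1
      = (t.foldl (pvStepB (pvAut cs2 0) (pvAut cs3 0)) (acc, k2, k3)).1 := by
  induction t with
  | nil => intro acc k2 k3 _ _; rfl
  | cons c t ih =>
    intro acc k2 k3 h2 h3
    rw [List.foldl_cons, List.foldl_cons]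
    obtain ⟨acc', k2', k3', h2', h3', hA, hB⟩ := pvStep_eq cs2 cs3 acc k2 k3 c h2 h3
    rw [hA, hB]
    exact ih acc' k2' k3' h2' h3'

-- ===== VERDICT (by name: the statement is the Claim_ definition above) =====
theorem get_longest_substring_spec : Claim_equal_get_longest_substring := by
  intro l1 l2 l3 _
  unfold Spec_get_longest_substring get_longest_substring get_longest_substring_alt
  rw [PySem.List.foldl_pyRange_zero_pyGetD' l1.toList ' '
    (pvStepA l2.toList l3.toList) ([], -1, -1)]
  rw [show (([], -1, -1) : List Char × Int × Int)
        = ([], ((0 : Nat) : Int) - 1, ((0 : Nat) : Int) - 1) by norm_num]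
  rw [pvMain l2.toList l3.toList l1.toList [] 0 0 (Nat.zero_le _) (Nat.zero_le _)]
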